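-- pv_equiv track=rewrite | github.com/kaza/s3-vector-voxco | webdemo/populate_data.py | generate_documents
-- ===== SOURCE A (Python) =====
-- from typing import List
--
-- TOPICS = [
--     "Python programming",
--     "JavaScript development",
--     "Machine learning",
--     "Data science",
--     "Web development",
--     "Cloud computing",
--     "Database management",
--     "API design",
--     "Software architecture",
--     "DevOps practices"
-- ]
--
-- SUBTOPICS = [
--     "introduction to",
--     "advanced techniques in",
--     "best practices for",
--     "common patterns in",
--     "troubleshooting",
--     "optimization strategies for",
--     "security considerations in",
--     "future trends in",
--     "getting started with",
--     "mastering"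
-- ]
--
-- def generate_documents(count: int = 100) -> List[str]:
--     """Generate UNIQUE document contents"""
--     documents = []
--     doc_id = 1
--
--     # Generate unique combinations
--     for topic in TOPICS:
--         for subtopic in SUBTOPICS:
--             if len(documents) >= count:
--                 break
--
--             # Create unique content with ID
--             content = f"Document {doc_id}: {subtopic.capitalize()} {topic} - A comprehensive guide with examples and best practices"
--             documents.append(content)
--             doc_id += 1
--
--             if len(documents) >= count:
--                 break
--
--     # If we need more, add some variations
--     variations = [
--         "The complete handbook for",
--         "Essential skills in",
--         "Professional guide to",
--         "Modern approaches to",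
--         "Practical applications of"
--     ]
--
--     for variation in variations:
--         for topic in TOPICS:
--             if len(documents) >= count:
--                 break
--
--             content = f"Document {doc_id}: {variation} {topic} - Industry insights and expert recommendations"
--             documents.append(content)
--             doc_id += 1
--
--     return documents[:count]  # Return exactly the requested count
-- ===== SOURCE B (Python) =====
-- from typing import List
--
-- TOPICS = [
--     "Python programming",
--     "JavaScript development",
--     "Machine learning",
--     "Data science",
--     "Web development",
--     "Cloud computing",
--     "Database management",
--     "API design",
--     "Software architecture",
--     "DevOps practices"
-- ]
--
-- SUBTOPICS = [
--     "introduction to",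
--     "advanced techniques in",
--     "best practices for",
--     "common patterns in",
--     "troubleshooting",
--     "optimization strategies for",
--     "security considerations in",
--     "future trends in",
--     "getting started with",
--     "mastering"
-- ]
--
-- VARIATIONS = [
--     "The complete handbook for",
--     "Essential skills in",
--     "Professional guide to",
--     "Modern approaches to",
--     "Practical applications of"
-- ]
--
-- def generate_documents(count: int = 100) -> List[str]:
--     """Generate UNIQUE document contents (closed-form per index, no nested loops)."""
--     n = min(count, 150)
--     result = []
--     for i in range(n):
--         if i < 100:
--             content = (f"Document {i + 1}: {SUBTOPICS[i % 10].capitalize()} {TOPICS[i // 10]}"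
--                        f" - A comprehensive guide with examples and best practices")
--         else:
--             j = i - 100
--             content = (f"Document {i + 1}: {VARIATIONS[j // 10]} {TOPICS[j % 10]}"
--                        f" - Industry insights and expert recommendations")
--         result.append(content)
--     return result[:count]
-- ===== Notes on version B (the rewrite author's own statement) =====
-- stated objective: alternative
-- what changed: Replaces A's two phases of nested loops with per-iteration break checks and a running doc_id by a single loop that computes each document string directly from its index using integer division and remainder.
import Mathlib
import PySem

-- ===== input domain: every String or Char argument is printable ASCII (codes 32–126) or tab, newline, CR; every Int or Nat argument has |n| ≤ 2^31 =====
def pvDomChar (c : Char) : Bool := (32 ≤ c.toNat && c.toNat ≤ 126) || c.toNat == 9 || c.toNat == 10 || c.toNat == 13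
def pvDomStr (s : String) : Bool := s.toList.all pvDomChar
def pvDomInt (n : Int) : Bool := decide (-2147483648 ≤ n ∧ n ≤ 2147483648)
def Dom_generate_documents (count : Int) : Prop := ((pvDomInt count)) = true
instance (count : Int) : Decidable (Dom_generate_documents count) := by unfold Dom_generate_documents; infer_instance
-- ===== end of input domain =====

-- B replaces A's two phases of nested loops (with break checks and a running doc_id) by one
-- pass over range(min(count,150)) computing each string directly from its index (alternative
-- decomposition, same cost).

-- shared module constants (A's module-level TOPICS/SUBTOPICS)
def pvTOPICS : List String :=
  ["Python programming", "JavaScript development", "Machine learning", "Data science",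
   "Web development", "Cloud computing", "Database management", "API design",
   "Software architecture", "DevOps practices"]

def pvSUBTOPICS : List String :=
  ["introduction to", "advanced techniques in", "best practices for", "common patterns in",
   "troubleshooting", "optimization strategies for", "security considerations in",
   "future trends in", "getting started with", "mastering"]

-- str.capitalize(): exact for the ASCII strings this module feeds it (hand port; PySem has no capitalize)
def pyCapitalize (s : String) : String :=
  match s.toList with
  | [] => ""
  | c :: cs => String.ofList (PySem.Chars.upper [c] ++ PySem.Chars.lower cs)

-- ===== PORT A =====
-- A's f-strings, built on List Char (Lean's String.append is kernel-opaque)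
def contentA1 (doc_id : Int) (subtopic topic : String) : String :=
  String.ofList ("Document ".toList ++ PySem.Int.toChars doc_id ++ ": ".toList ++
    (pyCapitalize subtopic).toList ++ " ".toList ++ topic.toList ++
    " - A comprehensive guide with examples and best practices".toList)

def contentA2 (doc_id : Int) (variation topic : String) : String :=
  String.ofList ("Document ".toList ++ PySem.Int.toChars doc_id ++ ": ".toList ++
    variation.toList ++ " ".toList ++ topic.toList ++
    " - Industry insights and expert recommendations".toList)

def pvVariationsA : List String :=
  ["The complete handbook for", "Essential skills in", "Professional guide to",
   "Modern approaches to", "Practical applications of"]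

-- inner 'for subtopic in SUBTOPICS' loop of phase 1 (break = return)
def innerA1 (count : Int) (topic : String) : List String → List String → Int → List String × Int
  | [], docs, doc_id => (docs, doc_id)
  | s :: rest, docs, doc_id =>
    if count ≤ (docs.length : Int) then (docs, doc_id)
    else innerA1 count topic rest (docs ++ [contentA1 doc_id s topic]) (doc_id + 1)

-- outer 'for topic in TOPICS' loop of phase 1 (second break check after the inner loop)
def outerA1 (count : Int) : List String → List String → Int → List String × Int
  | [], docs, doc_id => (docs, doc_id)
  | t :: rest, docs, doc_id =>
    let r := innerA1 count t pvSUBTOPICS docs doc_id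
    if count ≤ (r.1.length : Int) then r
    else outerA1 count rest r.1 r.2

-- inner 'for topic in TOPICS' loop of phase 2
def innerA2 (count : Int) (variation : String) : List String → List String → Int → List String × Int
  | [], docs, doc_id => (docs, doc_id)
  | t :: rest, docs, doc_id =>
    if count ≤ (docs.length : Int) then (docs, doc_id)
    else innerA2 count variation rest (docs ++ [contentA2 doc_id variation t]) (doc_id + 1)

-- outer 'for variation in variations' loop of phase 2 (no outer break in A)
def outerA2 (count : Int) : List String → List String → Int → List String × Int
  | [], docs, doc_id => (docs, doc_id)
  | v :: rest, docs, doc_id =>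
    let r := innerA2 count v pvTOPICS docs doc_id
    outerA2 count rest r.1 r.2

def generate_documents (count : Int) : List String :=
  let p1 := outerA1 count pvTOPICS [] 1
  let p2 := outerA2 count pvVariationsA p1.1 p1.2
  PySem.List.slice p2.1 none (some count)   -- documents[:count]

-- ===== PORT B =====
def pvVARIATIONS_B : List String :=
  ["The complete handbook for", "Essential skills in", "Professional guide to",
   "Modern approaches to", "Practical applications of"]

def contentB (i : Int) : String :=
  if i < 100 then
    String.ofList ("Document ".toList ++ PySem.Int.toChars (i + 1) ++ ": ".toList ++
      (pyCapitalize (PySem.List.pyGetD pvSUBTOPICS (PySem.Int.mod i 10) "")).toList ++ " ".toList ++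
      (PySem.List.pyGetD pvTOPICS (PySem.Int.floordiv i 10) "").toList ++
      " - A comprehensive guide with examples and best practices".toList)
  else
    let j := i - 100
    String.ofList ("Document ".toList ++ PySem.Int.toChars (i + 1) ++ ": ".toList ++
      (PySem.List.pyGetD pvVARIATIONS_B (PySem.Int.floordiv j 10) "").toList ++ " ".toList ++
      (PySem.List.pyGetD pvTOPICS (PySem.Int.mod j 10) "").toList ++
      " - Industry insights and expert recommendations".toList)

def generate_documents_alt (count : Int) : List String :=
  let n := min count 150
  let result := (PySem.List.pyRange 0 n 1).map contentB
  PySem.List.slice result none (some count)   -- result[:count]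

-- ===== PRECONDITION & SPEC =====
def Spec_generate_documents (count : Int) (out : List String) : Prop := out = generate_documents_alt count
instance (count : Int) (out : List String) : Decidable (Spec_generate_documents count out) := by unfold Spec_generate_documents; infer_instance

-- ===== CLAIM (what is proved, stated in full; the proofs are below) =====
def Claim_equal_generate_documents : Prop := ∀ (count : Int), Dom_generate_documents count → Spec_generate_documents count (generate_documents count)

-- ===== LEMMAS AND PROOFS =====

-- the chunk a full (or truncated) run of innerA1 appends
def rowA1 (t : String) : List String → Int → List String
  | [], _ => []
  | s :: rest, doc_id => contentA1 doc_id s t :: rowA1 t rest (doc_id + 1)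

def blockA1 : List String → List String → Int → List String
  | [], _, _ => []
  | t :: rest, subs, doc_id => rowA1 t subs doc_id ++ blockA1 rest subs (doc_id + subs.length)

def rowA2 (v : String) : List String → Int → List String
  | [], _ => []
  | t :: rest, doc_id => contentA2 doc_id v t :: rowA2 v rest (doc_id + 1)

def blockA2 : List String → List String → Int → List String
  | [], _, _ => []
  | v :: rest, ts, doc_id => rowA2 v ts doc_id ++ blockA2 rest ts (doc_id + ts.length)

def fullA : List String := blockA1 pvTOPICS pvSUBTOPICS 1 ++ blockA2 pvVariationsA pvTOPICS 101

theorem take_len_add {α : Type} (l₁ l₂ : List α) (n : ℕ) :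
    List.take (l₁.length + n) (l₁ ++ l₂) = l₁ ++ List.take n l₂ := by
  rw [List.take_append, List.take_of_length_le (by omega), Nat.add_sub_cancel_left]

theorem length_rowA1 (t : String) (subs : List String) (id : Int) :
    (rowA1 t subs id).length = subs.length := by
  induction subs generalizing id with
  | nil => rfl
  | cons s rest ih => simp [rowA1, ih]

theorem length_rowA2 (v : String) (ts : List String) (id : Int) :
    (rowA2 v ts id).length = ts.length := by
  induction ts generalizing id with
  | nil => rfl
  | cons t rest ih => simp [rowA2, ih]

theorem length_blockA1 (ts subs : List String) (id : Int) :
    (blockA1 ts subs id).length = ts.length * subs.length := by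
  induction ts generalizing id with
  | nil => simp [blockA1]
  | cons t rest ih => simp [blockA1, length_rowA1, ih]; ring

theorem length_blockA2 (vs ts : List String) (id : Int) :
    (blockA2 vs ts id).length = vs.length * ts.length := by
  induction vs generalizing id with
  | nil => simp [blockA2]
  | cons v rest ih => simp [blockA2, length_rowA2, ih]; ring

theorem innerA1_spec (count : Int) (t : String) (subs docs : List String) (id : Int) :
    innerA1 count t subs docs id =
      (docs ++ (rowA1 t subs id).take (min subs.length (count - docs.length).toNat),
       id + min subs.length (count - docs.length).toNat) := by
  induction subs generalizing docs id with
  | nil => simp [innerA1, rowA1]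
  | cons s rest ih =>
    by_cases h : count ≤ (docs.length : Int)
    · have h0 : (count - (docs.length : Int)).toNat = 0 := by omega
      simp [innerA1, h, h0]
    · have hk : min (rest.length + 1) (count - (docs.length : Int)).toNat
          = min rest.length ((count - ((docs.length : Int) + 1)).toNat) + 1 := by omega
      simp only [innerA1, if_neg h, ih]
      simp only [List.length_append, List.length_cons, List.length_nil, Nat.zero_add,
        Nat.cast_add, Nat.cast_one]
      rw [hk]
      simp only [rowA1, List.take_succ_cons, Prod.mk.injEq, List.append_assoc,
        List.singleton_append, Nat.cast_add, Nat.cast_one]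
      exact ⟨by trivial, by first | trivial | omega⟩

theorem innerA2_spec (count : Int) (v : String) (ts docs : List String) (id : Int) :
    innerA2 count v ts docs id =
      (docs ++ (rowA2 v ts id).take (min ts.length (count - docs.length).toNat),
       id + min ts.length (count - docs.length).toNat) := by
  induction ts generalizing docs id with
  | nil => simp [innerA2, rowA2]
  | cons t rest ih =>
    by_cases h : count ≤ (docs.length : Int)
    · have h0 : (count - (docs.length : Int)).toNat = 0 := by omega
      simp [innerA2, h, h0]
    · have hk : min (rest.length + 1) (count - (docs.length : Int)).toNat
          = min rest.length ((count - ((docs.length : Int) + 1)).toNat) + 1 := by omega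
      simp only [innerA2, if_neg h, ih]
      simp only [List.length_append, List.length_cons, List.length_nil, Nat.zero_add,
        Nat.cast_add, Nat.cast_one]
      rw [hk]
      simp only [rowA2, List.take_succ_cons, Prod.mk.injEq, List.append_assoc,
        List.singleton_append, Nat.cast_add, Nat.cast_one]
      exact ⟨by trivial, by first | trivial | omega⟩

theorem outerA1_spec (count : Int) (ts docs : List String) (id : Int) :
    outerA1 count ts docs id =
      (docs ++ (blockA1 ts pvSUBTOPICS id).take (min (10 * ts.length) (count - docs.length).toNat),
       id + min (10 * ts.length) (count - docs.length).toNat) := by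
  induction ts generalizing docs id with
  | nil => simp [outerA1, blockA1]
  | cons t rest ih =>
    have hs : pvSUBTOPICS.length = 10 := rfl
    simp only [outerA1, innerA1_spec, hs]
    set k1 := min 10 (count - (docs.length : Int)).toNat with hk1
    have hk1le : k1 ≤ 10 := by omega
    have hrow : (rowA1 t pvSUBTOPICS id).length = 10 := by rw [length_rowA1, hs]
    have hlen : ((docs ++ (rowA1 t pvSUBTOPICS id).take k1).length : Int)
        = (docs.length : Int) + k1 := by
      simp [List.length_take, hrow]; omega
    by_cases h : count ≤ (docs.length : Int) + k1
    · rw [if_pos (by rw [hlen]; exact h)]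
      have hk : min (10 * (t :: rest).length) (count - (docs.length : Int)).toNat = k1 := by
        rw [List.length_cons]; omega
      rw [hk]
      simp only [Prod.mk.injEq]
      refine ⟨?_, by trivial⟩
      congr 1
      rw [blockA1, List.take_append_of_le_length (by rw [hrow]; exact hk1le)]
    · rw [if_neg (by rw [hlen]; exact h)]
      have hk10 : k1 = 10 := by omega
      rw [ih]
      have htk : (rowA1 t pvSUBTOPICS id).take k1 = rowA1 t pvSUBTOPICS id := by
        rw [hk10, ← hrow, List.take_length]
      rw [htk]
      have hlen2 : ((docs ++ rowA1 t pvSUBTOPICS id).length : Int)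
          = (docs.length : Int) + k1 := by
        simp [hrow]; omega
      rw [hlen2]
      have hk' : min (10 * (t :: rest).length) (count - (docs.length : Int)).toNat
          = 10 + min (10 * rest.length) ((count - ((docs.length : Int) + k1))).toNat := by
        rw [List.length_cons]; omega
      rw [hk']
      simp only [Prod.mk.injEq]
      refine ⟨?_, by push_cast [hk10]; ring⟩
      rw [blockA1, hs, List.append_assoc]
      congr 1
      rw [hk10, ← hrow, take_len_add]

theorem outerA2_spec (count : Int) (vs docs : List String) (id : Int) :
    outerA2 count vs docs id =
      (docs ++ (blockA2 vs pvTOPICS id).take (min (10 * vs.length) (count - docs.length).toNat),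
       id + min (10 * vs.length) (count - docs.length).toNat) := by
  induction vs generalizing docs id with
  | nil => simp [outerA2, blockA2]
  | cons v rest ih =>
    have hs : pvTOPICS.length = 10 := rfl
    simp only [outerA2, innerA2_spec, hs, ih]
    set k1 := min 10 (count - (docs.length : Int)).toNat with hk1
    have hk1le : k1 ≤ 10 := by omega
    have hrow : (rowA2 v pvTOPICS id).length = 10 := by rw [length_rowA2, hs]
    have hlen : ((docs ++ (rowA2 v pvTOPICS id).take k1).length : Int)
        = (docs.length : Int) + k1 := by
      simp [List.length_take, hrow]; omega
    rw [hlen]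
    by_cases h : count ≤ (docs.length : Int) + k1
    · have hz : ((count - ((docs.length : Int) + (k1 : Int)))).toNat = 0 := by omega
      rw [hz]
      simp only [Nat.min_zero, List.take_zero, List.append_nil, Nat.cast_zero, add_zero]
      have hk : min (10 * (v :: rest).length) (count - (docs.length : Int)).toNat = k1 := by
        rw [List.length_cons]; omega
      rw [hk]
      simp only [Prod.mk.injEq]
      refine ⟨?_, by trivial⟩
      congr 1
      rw [blockA2, List.take_append_of_le_length (by rw [hrow]; exact hk1le)]
    · have hk10 : k1 = 10 := by omega
      have htk : (rowA2 v pvTOPICS id).take k1 = rowA2 v pvTOPICS id := by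
        rw [hk10, ← hrow, List.take_length]
      rw [htk]
      have hk' : min (10 * (v :: rest).length) (count - (docs.length : Int)).toNat
          = 10 + min (10 * rest.length) ((count - ((docs.length : Int) + k1))).toNat := by
        rw [List.length_cons]; omega
      rw [hk']
      simp only [Prod.mk.injEq]
      refine ⟨?_, by push_cast [hk10]; ring⟩
      rw [blockA2, hs, List.append_assoc]
      congr 1
      rw [hk10, ← hrow, take_len_add]

set_option maxRecDepth 100000 in
theorem fullA_eq : fullA = (List.range 150).map (fun k : Nat => contentB (k : Int)) := by rfl

theorem alt_eq (count : Int) (h : 0 ≤ count) :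
    generate_documents_alt count
      = (List.range (min count 150).toNat).map (fun k : Nat => contentB (k : Int)) := by
  show PySem.List.slice ((PySem.List.pyRange 0 (min count 150) 1).map contentB) none (some count)
      = (List.range (min count 150).toNat).map (fun k : Nat => contentB (k : Int))
  rw [PySem.List.pyRange_one, List.map_map, PySem.List.slice_to _ h]
  rw [List.take_of_length_le (by simp only [List.length_map, List.length_range]; omega)]
  simp

theorem A_eq (count : Int) (h : 0 ≤ count) :
    generate_documents count = fullA.take (min count 150).toNat := by
  unfold generate_documents
  have hT : pvTOPICS.length = 10 := rfl
  have hV : pvVariationsA.length = 5 := rfl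
  have hB1 : (blockA1 pvTOPICS pvSUBTOPICS 1).length = 100 := by
    rw [length_blockA1]; rfl
  simp only [outerA1_spec, outerA2_spec, List.nil_append, List.length_nil, Nat.cast_zero,
    sub_zero, hT, hV]
  set k1 := min (10 * 10) count.toNat with hk1def
  have hd1 : ((blockA1 pvTOPICS pvSUBTOPICS 1).take k1).length = k1 := by
    rw [List.length_take, hB1]; omega
  rw [hd1]
  set k2 := min (10 * 5) ((count - (k1 : Int))).toNat with hk2def
  rw [PySem.List.slice_to _ h]
  by_cases h100 : count.toNat ≤ 100
  · have hk2' : k2 = 0 := by omega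
    rw [hk2']
    simp only [List.take_zero, List.append_nil]
    have hlen : ((blockA1 pvTOPICS pvSUBTOPICS 1).take k1).length ≤ count.toNat := by
      rw [hd1]; omega
    rw [List.take_of_length_le hlen]
    unfold fullA
    rw [List.take_append_of_le_length (by rw [hB1]; omega)]
    congr 1
    omega
  · have hk1' : k1 = 100 := by omega
    have hid : (1 : Int) + (k1 : Nat) = 101 := by omega
    rw [hid]
    have htk1 : (blockA1 pvTOPICS pvSUBTOPICS 1).take k1 = blockA1 pvTOPICS pvSUBTOPICS 1 := by
      rw [hk1', ← hB1, List.take_length]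
    rw [htk1]
    have hlen2 : (blockA1 pvTOPICS pvSUBTOPICS 1
        ++ (blockA2 pvVariationsA pvTOPICS 101).take k2).length ≤ count.toNat := by
      simp only [List.length_append, List.length_take, hB1, length_blockA2, hT, hV]
      omega
    rw [List.take_of_length_le hlen2]
    have hn : (min count 150).toNat = 100 + k2 := by omega
    rw [hn]
    unfold fullA
    rw [← hB1, take_len_add]

-- ===== VERDICT (by name: the statement is the Claim_ definition above) =====
theorem generate_documents_spec : Claim_equal_generate_documents := by
  intro count _
  unfold Spec_generate_documents
  by_cases hneg : count < 0
  · unfold generate_documents generate_documents_alt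
    simp only [outerA1_spec, outerA2_spec, List.nil_append, List.length_nil, Nat.cast_zero,
      sub_zero]
    have h0 : count.toNat = 0 := by omega
    have hmin : min count 150 = count := by omega
    rw [hmin, PySem.List.pyRange_one_eq_nil (by omega)]
    simp [h0, PySem.List.slice]
  · have h : 0 ≤ count := by omega
    rw [A_eq count h, alt_eq count h, fullA_eq, ← List.map_take, List.take_range]
    have hmm : min (min count 150).toNat 150 = (min count 150).toNat := by omega
    rw [hmm]
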